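-- pv_equiv track=rewrite | github.com/matinabbasi788/contest | codeforces/1373-B.py | solve
-- ===== SOURCE A (Python) =====
-- def solve(s: list):
--     flg = False
--     i = 1
--     if len(s) == 1:
--         return flg
--     while s:
--         if s[i-1] != s[i]:
--             flg = not flg
--             s.pop(i)
--             s.pop(i-1)
--             i = 1
--         else:
--             i += 1
--         if i == len(s):
--             return flg
--     return flg
-- ===== SOURCE B (Python) =====
-- def solve(s: list):
--     # One-pass stack-as-counter: equivalent to repeatedly removing the leftmost
--     # unequal adjacent pair; returns parity of the number of removals.
--     # Note: A mutates s in place; B does not (equivalence is about the return value).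
--     r = 0
--     c = 0
--     v = None
--     for x in s:
--         if c and x != v:
--             c -= 1
--             r += 1
--         else:
--             v = x
--             c += 1
--     return r % 2 == 1
-- ===== Notes on version B (the rewrite author's own statement) =====
-- stated objective: faster
-- what changed: Replaced the restart-from-the-left scan with repeated pops by a single pass keeping a run-length counter of the constant prefix (the stack collapses to one value plus a count), returning the parity of removals.
import Mathlib
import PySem

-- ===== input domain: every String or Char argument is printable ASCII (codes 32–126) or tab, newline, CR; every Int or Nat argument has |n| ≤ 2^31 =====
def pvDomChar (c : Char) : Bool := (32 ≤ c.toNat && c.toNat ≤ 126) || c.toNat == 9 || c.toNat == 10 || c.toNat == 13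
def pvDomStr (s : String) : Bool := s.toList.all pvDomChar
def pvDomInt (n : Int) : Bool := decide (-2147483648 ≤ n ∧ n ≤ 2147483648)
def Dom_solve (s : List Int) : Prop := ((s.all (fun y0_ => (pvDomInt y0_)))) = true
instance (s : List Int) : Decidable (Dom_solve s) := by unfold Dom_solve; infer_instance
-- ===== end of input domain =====

-- B replaces A's restart-from-the-left pair-removal loop (repeated pops) by a single
-- pass with a run-length counter; A mutates its argument in place via pop, B does not —
-- the equivalence proved is about the return value only.

-- ===== PORT A =====
-- A's while loop as recursion on the state (s, i, flg); `s.pop(i); s.pop(i-1)` is the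
-- two eraseIdx (the popped values are discarded); the bottom `if i == len(s): return flg`
-- check is folded into each branch exactly as A reaches it.  The dite guard `i < s.length`
-- only totalizes the two subscripts: A's loop keeps 1 ≤ i < len(s) at every entry.
def solveLoop (s : List Int) (i : Nat) (flg : Bool) : Bool :=
  if s.isEmpty then flg                                -- `while s:` exit
  else if h : i < s.length then
    if s[i - 1]'(Nat.lt_of_le_of_lt (Nat.sub_le i 1) h) ≠ s[i] then   -- `if s[i-1] != s[i]:`
      let s' := (s.eraseIdx i).eraseIdx (i - 1)        -- s.pop(i); s.pop(i-1); i = 1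
      if 1 = s'.length then !flg                       -- `if i == len(s): return flg`
      else solveLoop s' 1 (!flg)
    else
      if i + 1 = s.length then flg                     -- `if i == len(s): return flg`
      else solveLoop s (i + 1) flg                     -- i += 1
  else flg                                             -- unreachable from solve's call
termination_by (s.length, s.length - i)
decreasing_by
  · exact Prod.Lex.left _ _ (Nat.lt_of_le_of_lt (List.length_eraseIdx_le _ _)
      (List.length_eraseIdx_of_lt h ▸ Nat.sub_lt (Nat.zero_lt_of_lt h) Nat.one_pos))
  · exact Prod.Lex.right _ (Nat.sub_succ_lt_self _ _ h)

def solve (s : List Int) : Bool :=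
  if s.length = 1 then false                           -- `if len(s) == 1: return flg`
  else solveLoop s 1 false

-- ===== PORT B =====
-- Source B's loop body on the state (r, c, v); `if c and x != v` is the conjunction below.
def bstep (st : Int × Int × Option Int) (x : Int) : Int × Int × Option Int :=
  if st.2.1 ≠ 0 ∧ some x ≠ st.2.2 then (st.1 + 1, st.2.1 - 1, st.2.2)
  else (st.1, st.2.1 + 1, some x)

def solve_alt (s : List Int) : Bool :=
  let st := s.foldl bstep (0, 0, none)
  PySem.Int.mod st.1 2 == 1                            -- `return r % 2 == 1`

-- ===== PRECONDITION & SPEC =====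
def Spec_solve (s : List Int) (out : Bool) : Prop := out = solve_alt s
instance (s : List Int) (out : Bool) : Decidable (Spec_solve s out) := by unfold Spec_solve; infer_instance

-- ===== CLAIM (what is proved, stated in full; the proofs are below) =====
def Claim_equal_solve : Prop := ∀ (s : List Int), Dom_solve s → Spec_solve s (solve s)

-- ===== LEMMAS AND PROOFS =====

-- the parity B reads off its removal counter
def bparity (r : Int) : Bool := PySem.Int.mod r 2 == 1

-- the r component only accumulates, so it can be shifted out of the fold
theorem bfold_shift (xs : List Int) : ∀ (r c : Int) (v : Option Int),
    (xs.foldl bstep (r, c, v)).1 = r + (xs.foldl bstep (0, c, v)).1 := by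
  induction xs with
  | nil => intro r c v; simp
  | cons x xs ih =>
    intro r c v
    simp only [List.foldl_cons, bstep]
    split_ifs with h
    · rw [ih (r + 1), ih (0 + 1)]; ring
    · exact ih r (c + 1) (some x)

theorem bparity_succ (r : Int) : bparity (1 + r) = !(bparity r) := by
  unfold bparity
  rcases Int.emod_two_eq r with h | h <;> simp [Int.add_emod, h]

theorem xor_not (f p : Bool) : ((!f) != p) = (f != !p) := by cases f <;> cases p <;> rfl

-- Main invariant: on a list whose first c elements are the constant v, with A's scan
-- position i still inside that prefix, A's loop returns flg xor the parity of the
-- removals B's one-pass fold performs on the remainder starting from counter c.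
theorem loop_eq (rest : List Int) (c i : Nat) (v : Int) (flg : Bool)
    (h1 : 1 ≤ i) (h2 : i ≤ c) (h3 : i < c + rest.length) :
    solveLoop (List.replicate c v ++ rest) i flg
      = (flg != bparity (rest.foldl bstep (0, (c : Int), some v)).1) := by
  have hlen : (List.replicate c v ++ rest).length = c + rest.length := by simp
  have hne : (List.replicate c v ++ rest).isEmpty = false := by
    simp; intro h; omega
  have hilt : i < (List.replicate c v ++ rest).length := by omega
  have hgpre : ∀ (j : Nat) (hj : j < c) (hj' : j < (List.replicate c v ++ rest).length),
      (List.replicate c v ++ rest)[j]'hj' = v := by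
    intro j hj hj'
    rw [List.getElem_append_left (by simpa using hj)]
    simp
  rw [solveLoop, hne]
  simp only [Bool.false_eq_true, if_false, dif_pos hilt]
  rw [hgpre (i - 1) (by omega)]
  by_cases hic : i < c
  · -- inside the constant prefix: pair equal, advance i
    rw [hgpre i hic]
    simp only [ne_eq, not_true_eq_false, if_false]
    by_cases hend : i + 1 = (List.replicate c v ++ rest).length
    · rw [if_pos hend]
      have hrest : rest = [] := by
        rw [hlen] at hend
        cases rest with
        | nil => rfl
        | cons y ys => simp at hend; omega
      subst hrest
      simp [bparity, PySem.Int.mod]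
    · rw [if_neg hend]
      rw [hlen] at hend
      exact loop_eq rest c (i + 1) v flg (by omega) (by omega) (by omega)
  · -- i = c: compare v with the head of rest
    have hic' : i = c := by omega
    subst hic'
    obtain ⟨x, rest', hr⟩ : ∃ x rest', rest = x :: rest' := by
      cases rest with
      | nil => exact absurd h3 (by simp)
      | cons y ys => exact ⟨y, ys, rfl⟩
    subst hr
    have hgx : (List.replicate i v ++ x :: rest')[i]'hilt = x := by
      rw [List.getElem_append_right (by simp)]
      simp
    rw [hgx]
    by_cases hxv : x = v
    · -- equal: extend the run
      rw [if_neg (by simp [hxv])]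
      have hfold : (x :: rest').foldl bstep (0, (i : Int), some v)
          = rest'.foldl bstep (0, ((i : Int) + 1), some v) := by
        simp [bstep, hxv]
      by_cases hend : i + 1 = (List.replicate i v ++ x :: rest').length
      · rw [if_pos hend]
        have hrest' : rest' = [] := by
          simp at hend
          cases rest' with
          | nil => rfl
          | cons z zs => simp at hend
        subst hrest'
        simp [bparity, bstep, hxv, PySem.Int.mod]
      · rw [if_neg hend]
        simp only [List.length_append, List.length_replicate, List.length_cons] at hend
        have hrest' : rest' ≠ [] := by
          intro h; subst h; simp at hend
        have hrepl : List.replicate i v ++ x :: rest' = List.replicate (i + 1) v ++ rest' := by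
          rw [List.replicate_succ', hxv]; simp
        rw [hrepl,
          loop_eq rest' (i + 1) (i + 1) v flg (by omega) le_rfl
            (by cases rest' with
                | nil => exact absurd rfl hrest'
                | cons z zs => simp),
          hfold]
        push_cast
        rfl
    · -- unequal: A pops the pair and restarts at i = 1; B counts one removal
      rw [if_pos (by simpa using fun h => hxv h.symm)]
      have herase : ((List.replicate i v ++ x :: rest').eraseIdx i).eraseIdx (i - 1)
          = List.replicate (i - 1) v ++ rest' := by
        rw [List.eraseIdx_append_of_length_le (by simp) (x :: rest')]
        simp only [List.length_replicate, Nat.sub_self, List.eraseIdx_cons_zero]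
        rw [List.eraseIdx_append_of_lt_length (by simp; omega) rest',
          List.eraseIdx_replicate, if_pos (by omega)]
      simp only [herase]
      have hfold1 : ((x :: rest').foldl bstep (0, (i : Int), some v)).1
          = 1 + (rest'.foldl bstep (0, ((i : Int) - 1), some v)).1 := by
        simp only [List.foldl_cons, bstep, ne_eq]
        rw [if_pos ⟨by exact_mod_cast (by omega : (i:Int) ≠ 0), by simp [hxv]⟩]
        exact bfold_shift rest' (0 + 1) _ _
      rw [hfold1, bparity_succ, ← xor_not]
      by_cases hone : 1 = (i - 1) + rest'.length
      · rw [if_pos (by simpa using hone)]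
        rcases Nat.lt_or_ge i 2 with hi2 | hi2
        · -- i = 1, rest' = [y]
          have hi1 : i = 1 := by omega
          subst hi1
          obtain ⟨y, hy⟩ : ∃ y, rest' = [y] := by
            cases rest' with
            | nil => simp at hone
            | cons z zs => cases zs with
              | nil => exact ⟨z, rfl⟩
              | cons w ws => simp at hone
          subst hy
          simp [bstep, bparity, PySem.Int.mod]
        · -- i = 2, rest' = []
          have hi2' : i = 2 := by omega
          have hr0 : rest' = [] := by
            cases rest' with
            | nil => rfl
            | cons z zs => exfalso; simp at hone; omega
          subst hi2' hr0
          simp [bparity, PySem.Int.mod]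
      · rw [if_neg (by simpa using hone)]
        rcases Nat.lt_or_ge i 2 with hi2 | hi2
        · -- i = 1: the constant prefix is gone, A restarts on rest'
          have hi1 : i = 1 := by omega
          subst hi1
          simp only [Nat.sub_self, List.replicate_zero, List.nil_append]
          cases rest' with
          | nil =>
            rw [solveLoop]
            simp [bparity, PySem.Int.mod]
          | cons y rest'' =>
            have h2' : rest'' ≠ [] := by intro h; subst h; simp at hone
            have hstep : List.foldl bstep (0, ((1:Nat):Int) - 1, some v) (y :: rest'')
                = List.foldl bstep (0, ((1:Nat):Int), some y) rest'' := by
              norm_num [bstep]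
            rw [hstep,
              show (y :: rest'' : List Int) = List.replicate 1 y ++ rest'' by simp,
              loop_eq rest'' 1 1 y (!flg) le_rfl le_rfl
                (by cases rest'' with
                    | nil => exact absurd rfl h2'
                    | cons z zs => simp)]
        · -- i ≥ 2: shrink the constant prefix by one
          have ecast : ((i - 1 : Nat) : Int) = (i : Int) - 1 := by omega
          rw [loop_eq rest' (i - 1) 1 v (!flg) le_rfl (by omega) (by omega), ecast]
termination_by (rest.length, c - i)
decreasing_by
  · exact Prod.Lex.right _ (by omega)
  · exact Prod.Lex.left _ _ (by subst_vars; simp only [List.length_cons]; omega)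
  · exact Prod.Lex.left _ _ (by subst_vars; simp only [List.length_cons]; omega)
  · exact Prod.Lex.left _ _ (by subst_vars; simp only [List.length_cons]; omega)

theorem solve_eq_alt (s : List Int) : solve s = solve_alt s := by
  cases s with
  | nil => simp [solve, solve_alt, solveLoop, PySem.Int.mod]
  | cons x t =>
    cases t with
    | nil => simp [solve, solve_alt, bstep, PySem.Int.mod]
    | cons y t' =>
      have hlen : (x :: y :: t' : List Int).length ≠ 1 := by simp
      have hrepl : (x :: y :: t' : List Int) = List.replicate 1 x ++ (y :: t') := by simp
      have hfirst : (x :: y :: t' : List Int).foldl bstep (0, 0, none)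
          = (y :: t').foldl bstep (0, ((1:Nat):Int), some x) := by
        norm_num [bstep]
      rw [solve, if_neg hlen, hrepl,
        loop_eq (y :: t') 1 1 x false le_rfl le_rfl (by simp)]
      rw [solve_alt]
      simp only [← hrepl, hfirst, bparity, Bool.false_bne]

-- ===== VERDICT (by name: the statement is the Claim_ definition above) =====
theorem solve_spec : Claim_equal_solve := by
  intro s _
  unfold Spec_solve
  exact solve_eq_alt s
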